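-- pv_equiv track=rewrite | github.com/DaehwanKimLab/hisat2 | hisat2_simulate_reads.py | convertCoordFromTranscriptToGenome
-- ===== SOURCE A (Python) =====
-- def convertCoordFromTranscriptToGenome(transcript, pos):
--     # Convert a transcript-based coordinate to a chromosome-based coordinate
--     gpos = 0
--     for ei, e in enumerate(transcript):
--         e_left, e_right = e[:2]
--         e_len = e_right - e_left + 1
--         if pos < e_len:
--             gpos = e_left + pos
--             return gpos, ei
--         else:
--             pos -= e_len
--
--     return gpos, -1
-- ===== SOURCE B (Python) =====
-- def convertCoordFromTranscriptToGenome(transcript, pos):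
--     # Exon i covers the transcript interval [bounds[i], bounds[i+1]); find it by
--     # searching the boundary table and map pos with absolute offsets.
--     bounds = [0]
--     for left, right in transcript:
--         bounds.append(bounds[-1] + right - left + 1)
--     return next(
--         ((left + pos - lo, ei)
--          for ei, ((left, _), lo, hi) in enumerate(zip(transcript, bounds, bounds[1:]))
--          if pos < hi),
--         (0, -1),
--     )
-- ===== Notes on version B (the rewrite author's own statement) =====
-- stated objective: alternative
-- what changed: Builds an absolute prefix-sum boundary table once and selects the containing exon by a declarative search over the zipped (exon, lower, upper) boundary triples, mapping pos with absolute offsets instead of destructively decrementing pos exon by exon.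
import Mathlib
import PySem

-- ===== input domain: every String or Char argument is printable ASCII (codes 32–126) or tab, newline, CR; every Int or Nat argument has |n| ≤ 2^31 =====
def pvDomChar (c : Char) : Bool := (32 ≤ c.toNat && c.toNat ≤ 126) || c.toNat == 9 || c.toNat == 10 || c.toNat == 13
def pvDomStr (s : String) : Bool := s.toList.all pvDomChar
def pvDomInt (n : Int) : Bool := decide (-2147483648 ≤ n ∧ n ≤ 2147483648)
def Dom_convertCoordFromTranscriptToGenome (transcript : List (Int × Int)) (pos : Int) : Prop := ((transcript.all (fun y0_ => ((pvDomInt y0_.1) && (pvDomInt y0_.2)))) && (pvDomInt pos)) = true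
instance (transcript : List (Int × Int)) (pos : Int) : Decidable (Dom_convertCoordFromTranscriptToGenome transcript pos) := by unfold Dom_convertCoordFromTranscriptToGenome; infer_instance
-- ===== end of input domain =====

-- B builds an absolute prefix-sum boundary table once and searches the zipped
-- (exon, lower, upper) triples for the containing exon, mapping pos with absolute
-- offsets instead of destructively decrementing pos exon by exon (alternative
-- decomposition, same results on every input).

-- ===== PORT A =====
-- A's for-loop: state is the remaining pos and the current index ei
def pvCAgo : List (Int × Int) → Int → Int → Int × Int
  | [], _, _ => (0, -1)
  | (l, r) :: rest, pos, ei =>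
    let elen := r - l + 1
    if pos < elen then (l + pos, ei) else pvCAgo rest (pos - elen) (ei + 1)

def convertCoordFromTranscriptToGenome (transcript : List (Int × Int)) (pos : Int) : Int × Int :=
  pvCAgo transcript pos 0

-- ===== PORT B =====
-- Source B's boundary-table loop: bounds = [0]; bounds.append(bounds[-1] + right - left + 1)
def pvBounds : List (Int × Int) → Int → List Int
  | [], s => [s]
  | (l, r) :: rest, s => s :: pvBounds rest (s + (r - l + 1))

-- Source B's next(generator, (0, -1)): first zipped triple with pos < hi
def pvScan : List ((Int × Int) × Int × Int) → Int → Int → Int × Int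
  | [], _, _ => (0, -1)
  | ((l, _), lo, hi) :: rest, pos, ei =>
    if pos < hi then (l + pos - lo, ei) else pvScan rest pos (ei + 1)

def convertCoordFromTranscriptToGenome_alt (transcript : List (Int × Int)) (pos : Int) : Int × Int :=
  let bounds := pvBounds transcript 0
  pvScan (transcript.zip (bounds.zip bounds.tail)) pos 0

-- ===== PRECONDITION & SPEC =====
def Spec_convertCoordFromTranscriptToGenome (transcript : List (Int × Int)) (pos : Int) (out : Int × Int) : Prop := out = convertCoordFromTranscriptToGenome_alt transcript pos
instance (transcript : List (Int × Int)) (pos : Int) (out : Int × Int) : Decidable (Spec_convertCoordFromTranscriptToGenome transcript pos out) := by unfold Spec_convertCoordFromTranscriptToGenome; infer_instance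

-- ===== CLAIM (what is proved, stated in full; the proofs are below) =====
def Claim_equal_convertCoordFromTranscriptToGenome : Prop := ∀ (transcript : List (Int × Int)) (pos : Int), Dom_convertCoordFromTranscriptToGenome transcript pos → Spec_convertCoordFromTranscriptToGenome transcript pos (convertCoordFromTranscriptToGenome transcript pos)

-- ===== LEMMAS AND PROOFS =====

-- pvBounds always starts with its seed
theorem pvBounds_head (t : List (Int × Int)) (s : Int) :
    ∃ u, pvBounds t s = s :: u := by
  cases t with
  | nil => exact ⟨[], rfl⟩
  | cons e rest => obtain ⟨l, r⟩ := e; exact ⟨_, rfl⟩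

-- the zipped triple list unfolds one exon at a time
theorem zip_bounds_cons (l r : Int) (rest : List (Int × Int)) (s : Int) :
    ((l, r) :: rest).zip ((pvBounds ((l, r) :: rest) s).zip (pvBounds ((l, r) :: rest) s).tail)
      = ((l, r), s, s + (r - l + 1)) ::
        rest.zip ((pvBounds rest (s + (r - l + 1))).zip (pvBounds rest (s + (r - l + 1))).tail) := by
  obtain ⟨u, hu⟩ := pvBounds_head rest (s + (r - l + 1))
  simp [pvBounds, hu]

-- B's scan over absolute boundaries is A's loop over the shifted position
theorem scan_eq_go (t : List (Int × Int)) (pos s ei : Int) :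
    pvScan (t.zip ((pvBounds t s).zip (pvBounds t s).tail)) pos ei
      = pvCAgo t (pos - s) ei := by
  induction t generalizing pos s ei with
  | nil => simp [pvBounds, pvScan, pvCAgo]
  | cons e rest ih =>
    obtain ⟨l, r⟩ := e
    rw [zip_bounds_cons]
    simp only [pvScan, pvCAgo, ih]
    have hc : (pos < s + (r - l + 1)) ↔ (pos - s < r - l + 1) := by omega
    by_cases h : pos < s + (r - l + 1)
    · rw [if_pos h, if_pos (hc.mp h)]
      have : l + pos - s = l + (pos - s) := by ring
      rw [this]
    · rw [if_neg h, if_neg (fun hx => h (hc.mpr hx))]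
      congr 1
      ring

-- ===== VERDICT (by name: the statement is the Claim_ definition above) =====
theorem convertCoordFromTranscriptToGenome_spec : Claim_equal_convertCoordFromTranscriptToGenome := by
  intro t pos _
  unfold Spec_convertCoordFromTranscriptToGenome convertCoordFromTranscriptToGenome
    convertCoordFromTranscriptToGenome_alt
  rw [scan_eq_go t pos 0 0]
  norm_num
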